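-- pv_equiv track=rewrite | github.com/linaro-swg/optee_examples | attestation/scripts/va.py | cast_public_pem
-- ===== SOURCE A (Python) =====
-- def cast_public_pem(str_b64):
--         header = "-----BEGIN RSA PUBLIC KEY-----\n"
--         footer = "\n-----END RSA PUBLIC KEY-----"
--         s = header
--         rows = int(len(str_b64)/64)
--         for i in range(rows):
--             s = s + str_b64[i*64:i*64+64]
--             s +="\n"
--         s = s + str_b64[rows*64:] + footer
--         return s
-- ===== SOURCE B (Python) =====
-- def cast_public_pem(str_b64):
--     parts = ["-----BEGIN RSA PUBLIC KEY-----\n"]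
--     for k, ch in enumerate(str_b64):
--         parts.append(ch)
--         if (k + 1) % 64 == 0:
--             parts.append("\n")
--     parts.append("\n-----END RSA PUBLIC KEY-----")
--     return "".join(parts)
-- ===== Notes on version B (the rewrite author's own statement) =====
-- stated objective: alternative
-- what changed: B makes a single character-by-character pass with enumerate, emitting each character and a newline whenever the 1-based position is a multiple of 64, instead of A's block-slicing loop over row indices plus a separate remainder concatenation.
import Mathlib
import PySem

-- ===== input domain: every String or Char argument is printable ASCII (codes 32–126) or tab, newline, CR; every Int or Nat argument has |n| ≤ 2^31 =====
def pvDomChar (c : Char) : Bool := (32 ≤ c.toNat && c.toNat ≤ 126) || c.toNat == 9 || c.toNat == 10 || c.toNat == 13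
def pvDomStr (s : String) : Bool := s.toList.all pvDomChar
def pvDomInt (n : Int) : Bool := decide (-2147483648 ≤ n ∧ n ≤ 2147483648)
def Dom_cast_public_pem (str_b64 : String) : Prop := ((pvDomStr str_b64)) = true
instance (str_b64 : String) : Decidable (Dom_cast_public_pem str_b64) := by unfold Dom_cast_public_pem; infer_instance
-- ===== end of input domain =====

-- B is a single character-by-character pass (enumerate + modular counter) emitting a newline
-- after every 64th character, instead of A's row-index loop over 64-char slices plus a
-- separate remainder concatenation; objective: alternative, same cost.

-- ===== PORT A =====
-- `int(len(str_b64)/64)` on a nonnegative length is floor division, i.e. Nat division here.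
def cast_public_pem (str_b64 : String) : String :=
  let header := "-----BEGIN RSA PUBLIC KEY-----\n"
  let footer := "\n-----END RSA PUBLIC KEY-----"
  let cs := str_b64.toList
  let rows : Nat := cs.length / 64
  let s := (PySem.List.pyRange 0 (rows : Int) 1).foldl
    (fun s i => s ++ PySem.List.slice cs (some (i * 64)) (some (i * 64 + 64)) ++ ['\n'])
    header.toList
  String.ofList (s ++ PySem.List.slice cs (some ((rows : Int) * 64)) none ++ footer.toList)

-- ===== PORT B =====
-- parts is a list of string pieces joined at the end; ported as the concatenated char list.
def cast_public_pem_alt (str_b64 : String) : String :=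
  let parts := (PySem.List.enumerate str_b64.toList).foldl
    (fun acc p =>
      let acc := acc ++ [p.2]
      if PySem.Int.mod (p.1 + 1) 64 = 0 then acc ++ ['\n'] else acc)
    "-----BEGIN RSA PUBLIC KEY-----\n".toList
  String.ofList (parts ++ "\n-----END RSA PUBLIC KEY-----".toList)

-- ===== PRECONDITION & SPEC =====
def Spec_cast_public_pem (str_b64 : String) (out : String) : Prop := out = cast_public_pem_alt str_b64
instance (str_b64 : String) (out : String) : Decidable (Spec_cast_public_pem str_b64 out) := by unfold Spec_cast_public_pem; infer_instance

-- ===== CLAIM (what is proved, stated in full; the proofs are below) =====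
def Claim_equal_cast_public_pem : Prop := ∀ (str_b64 : String), Dom_cast_public_pem str_b64 → Spec_cast_public_pem str_b64 (cast_public_pem str_b64)

-- ===== LEMMAS AND PROOFS =====

-- the common recursive characterization of the PEM body (header/footer excluded)
def chunkRec (cs : List Char) : List Char :=
  if _h : cs.length < 64 then cs
  else cs.take 64 ++ '\n' :: chunkRec (cs.drop 64)
termination_by cs.length
decreasing_by simp; omega

-- B's countdown view: r characters remain until the next newline
def nlRec (r : Nat) : List Char → List Char
  | [] => []
  | c :: t => c :: (if r = 1 then '\n' :: nlRec 64 t else nlRec (r - 1) t)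

theorem abody_eq (cs : List Char) :
    (List.range (cs.length / 64)).flatMap (fun i => (cs.drop (i * 64)).take 64 ++ ['\n'])
      ++ cs.drop (cs.length / 64 * 64) = chunkRec cs := by
  by_cases h : cs.length < 64
  · have h0 : cs.length / 64 = 0 := by omega
    rw [chunkRec]
    simp [h, h0]
  · have h1 : cs.length / 64 = (cs.length - 64) / 64 + 1 := by omega
    have IH := abody_eq (cs.drop 64)
    rw [List.length_drop] at IH
    rw [chunkRec]
    simp only [h, dif_neg, not_false_iff]
    rw [h1, List.range_succ_eq_map, List.flatMap_cons, List.flatMap_map]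
    have hf : ∀ a : Nat, cs.drop (a.succ * 64) = (cs.drop 64).drop (a * 64) := by
      intro a; rw [List.drop_drop]; congr 1; omega
    have hd : cs.drop (((cs.length - 64) / 64 + 1) * 64)
        = (cs.drop 64).drop ((cs.length - 64) / 64 * 64) := by
      rw [List.drop_drop]; congr 1; omega
    simp only [hf, Nat.zero_mul, List.drop_zero, List.append_assoc, List.cons_append]
    rw [IH]
    simp
termination_by cs.length
decreasing_by simp; omega

theorem aside_eq (cs : List Char) (acc : List Char) :
    (PySem.List.pyRange 0 ((cs.length / 64 : Nat) : Int) 1).foldl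
      (fun s i => s ++ PySem.List.slice cs (some (i * 64)) (some (i * 64 + 64)) ++ ['\n']) acc
    ++ PySem.List.slice cs (some (((cs.length / 64 : Nat) : Int) * 64)) none
    = acc ++ chunkRec cs := by
  simp only [List.append_assoc]
  rw [PySem.List.foldl_append_eq_flatMap, List.append_assoc]
  congr 1
  rw [PySem.List.pyRange_one, List.flatMap_map]
  have hg : (fun k : Nat => PySem.List.slice cs (some ((0 + (k : Int)) * 64)) (some ((0 + (k : Int)) * 64 + 64)) ++ ['\n'])
      = (fun k : Nat => (cs.drop (k * 64)).take 64 ++ ['\n']) := by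
    funext k
    rw [PySem.List.slice_toNat cs (by positivity) (by positivity)]
    have h1 : ((0 + (k : Int)) * 64).toNat = k * 64 := by omega
    have h2 : ((0 + (k : Int)) * 64 + 64).toNat = k * 64 + 64 := by omega
    rw [h1, h2]
    simp
  rw [hg, PySem.List.slice_from cs (by positivity)]
  have h3 : ((((cs.length / 64 : Nat) : Int)) * 64).toNat = cs.length / 64 * 64 := by omega
  have h4 : (((cs.length / 64 : Nat) : Int) - 0).toNat = cs.length / 64 := by omega
  rw [h3, h4]
  exact abody_eq cs

theorem enum_nl (cs : List Char) (s : Nat) :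
    (PySem.List.enumerate cs (s : Int)).flatMap
        (fun p => p.2 :: (if PySem.Int.mod (p.1 + 1) 64 = 0 then ['\n'] else []))
      = nlRec (64 - s % 64) cs := by
  induction cs generalizing s with
  | nil => simp [PySem.List.enumerate_nil, nlRec]
  | cons c t ih =>
    rw [PySem.List.enumerate_cons, List.flatMap_cons]
    have hc : ((s : Int) + 1) = (((s + 1 : Nat)) : Int) := by push_cast; ring
    have hm : PySem.Int.mod (((s + 1 : Nat)) : Int) 64 = (((s + 1) % 64 : Nat) : Int) := by
      exact_mod_cast PySem.Int.mod_natCast (s + 1) 64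
    rw [hc, hm]
    have ih' := ih (s + 1)
    by_cases h : (s + 1) % 64 = 0
    · have h1 : 64 - s % 64 = 1 := by omega
      have h2 : 64 - (s + 1) % 64 = 64 := by omega
      rw [h1]
      simp only [nlRec]
      rw [← h2, ← ih', h]
      have hd : (64 : Int) ∣ (s : Int) + 1 := by omega
      simp [hd]
    · have h1 : 64 - s % 64 ≠ 1 := by omega
      have h2 : 64 - (s + 1) % 64 = 64 - s % 64 - 1 := by omega
      have hne : (((s + 1) % 64 : Nat) : Int) ≠ 0 := by exact_mod_cast h
      simp only [nlRec, if_neg h1, if_neg hne]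
      rw [← h2, ← ih']
      simp

theorem nlRec_of_lt (cs : List Char) (r : Nat) (h : cs.length < r) : nlRec r cs = cs := by
  induction cs generalizing r with
  | nil => simp [nlRec]
  | cons c t ih =>
    have h1 : r ≠ 1 := by simp at h; omega
    simp only [nlRec, if_neg h1]
    rw [ih (r - 1) (by simp at h ⊢; omega)]

theorem nlRec_step (cs : List Char) (r : Nat) (h1 : 1 ≤ r) (h2 : r ≤ cs.length) :
    nlRec r cs = cs.take r ++ '\n' :: nlRec 64 (cs.drop r) := by
  induction cs generalizing r with
  | nil => simp at h2; omega
  | cons c t ih =>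
    by_cases hr : r = 1
    · subst hr; simp [nlRec]
    · obtain ⟨r', rfl⟩ : ∃ r', r = r' + 1 := ⟨r - 1, by omega⟩
      simp only [nlRec, if_neg hr, Nat.add_sub_cancel]
      rw [ih r' (by omega) (by simp at h2; omega)]
      simp [List.take_succ_cons]

theorem nlRec64_eq_chunkRec (cs : List Char) : nlRec 64 cs = chunkRec cs := by
  by_cases h : cs.length < 64
  · rw [chunkRec]
    simp only [h, dif_pos]
    exact nlRec_of_lt cs 64 h
  · rw [chunkRec]
    simp only [h, dif_neg, not_false_iff]
    rw [nlRec_step cs 64 (by omega) (by omega)]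
    rw [nlRec64_eq_chunkRec (cs.drop 64)]
termination_by cs.length
decreasing_by simp; omega

theorem bside_eq (cs : List Char) (acc : List Char) :
    (PySem.List.enumerate cs).foldl
      (fun acc p =>
        let acc := acc ++ [p.2]
        if PySem.Int.mod (p.1 + 1) 64 = 0 then acc ++ ['\n'] else acc) acc
    = acc ++ chunkRec cs := by
  have hf : (fun (acc : List Char) (p : Int × Char) =>
        let acc := acc ++ [p.2]
        if PySem.Int.mod (p.1 + 1) 64 = 0 then acc ++ ['\n'] else acc)
      = (fun acc p => acc ++ (p.2 :: (if PySem.Int.mod (p.1 + 1) 64 = 0 then ['\n'] else []))) := by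
    funext acc p
    split_ifs <;> simp
  rw [hf, PySem.List.foldl_append_eq_flatMap]
  congr 1
  have h0 : PySem.List.enumerate cs = PySem.List.enumerate cs ((0 : Nat) : Int) := by norm_num
  rw [h0, enum_nl cs 0]
  simpa using nlRec64_eq_chunkRec cs

-- ===== VERDICT (by name: the statement is the Claim_ definition above) =====
theorem cast_public_pem_spec : Claim_equal_cast_public_pem := by
  intro s _
  unfold Spec_cast_public_pem
  simp only [cast_public_pem, cast_public_pem_alt]
  congr 1
  rw [bside_eq s.toList]
  congr 1
  exact aside_eq s.toList _
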